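-- pv_equiv track=rewrite | github.com/choo0618/TIL | algoritm/20상반기 코딩테스트/.Line 코딩테스트/5.py | solution
-- ===== SOURCE A (Python) =====
-- def solution(dataSource, tags):
--     answer = []
--     Result = []
--
--     for Doc,*Tag in dataSource:
--         cnt=0
--         for t in tags:
--             if t in Tag:cnt+=1
--         if cnt:answer.append((Doc,cnt))
--     answer.sort(key=lambda x:x[1],reverse=True)
--
--     rCnt=0
--     for Doc,cnt in answer:
--         if rCnt==10:break
--         Result.append(Doc)
--         rCnt+=1
--
--     return Result
-- ===== SOURCE B (Python) =====
-- def solution(dataSource, tags):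
--     # Bucket documents by match count (1..len(tags)), then walk counts high-to-low.
--     buckets = [[] for _ in range(len(tags) + 1)]
--     for row in dataSource:
--         doc = row[0]
--         rest = row[1:]
--         cnt = sum(1 for t in tags if t in rest)
--         if cnt:
--             buckets[cnt].append(doc)
--     result = []
--     for c in range(len(tags), 0, -1):
--         for doc in buckets[c]:
--             if len(result) == 10:
--                 return result
--             result.append(doc)
--     return result
-- ===== Notes on version B (the rewrite author's own statement) =====
-- stated objective: alternative
-- what changed: Replaces the comparison sort (sort by count descending, then take 10) with counting buckets indexed by match count, walked from the highest count down while collecting at most 10 names; stability of the reverse sort corresponds to insertion order inside each bucket.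
import Mathlib
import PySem

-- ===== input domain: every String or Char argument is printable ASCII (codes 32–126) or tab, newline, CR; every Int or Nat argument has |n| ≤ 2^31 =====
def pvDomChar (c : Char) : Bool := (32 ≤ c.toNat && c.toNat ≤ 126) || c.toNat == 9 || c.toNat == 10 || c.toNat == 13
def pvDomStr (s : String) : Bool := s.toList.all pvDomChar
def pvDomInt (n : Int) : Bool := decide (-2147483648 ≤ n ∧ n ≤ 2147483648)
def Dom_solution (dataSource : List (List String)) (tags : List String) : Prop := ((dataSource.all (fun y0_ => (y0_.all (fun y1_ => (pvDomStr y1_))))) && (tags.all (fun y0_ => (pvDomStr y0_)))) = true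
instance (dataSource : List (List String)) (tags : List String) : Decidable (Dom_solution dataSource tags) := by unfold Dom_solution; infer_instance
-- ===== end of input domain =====

-- B replaces A's reverse comparison sort + take-10 loop with counting buckets indexed by
-- match count walked high-to-low (alternative decomposition; same return value).


-- ===== PORT A =====
-- the second loop of A: 'for Doc,cnt in answer: if rCnt==10: break; Result.append(Doc); rCnt+=1'
def solTakeLoop : List (String × Int) → Int → List String
  | [], _ => []
  | (d, _) :: rest, rCnt => if rCnt == 10 then [] else d :: solTakeLoop rest (rCnt + 1)

def solution (dataSource : List (List String)) (tags : List String) : List String :=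
  let answer := dataSource.foldl (fun acc row =>
    let Doc := row.headD ""          -- Doc,*Tag = row; Pre_ excludes empty rows (ValueError)
    let Tag := row.tail
    let cnt : Int := tags.foldl (fun c t => if Tag.contains t then c + 1 else c) 0
    if cnt != 0 then acc ++ [(Doc, cnt)] else acc) []
  let sortedAns := PySem.List.sorted answer (fun x => x.2) true
  solTakeLoop sortedAns 0

-- ===== PORT B =====
-- inner 'for doc in buckets[c]: if len(result)==10: return result; result.append(doc)'
def altTake10 : List String → List String → List String
  | [], res => res
  | d :: bs, res => if res.length == 10 then res else altTake10 bs (res ++ [d])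

-- outer 'for c in range(len(tags), 0, -1)': k counts down from len(tags) to 1
def altCollect (buckets : List (List String)) : Nat → List String → List String
  | 0, res => res
  | k + 1, res => altCollect buckets k (altTake10 (buckets.getD (k + 1) []) res)

def solution_alt (dataSource : List (List String)) (tags : List String) : List String :=
  let buckets := dataSource.foldl (fun bs row =>
    let doc := row.headD ""          -- row[0]; Pre_ excludes empty rows (IndexError)
    let rest := row.tail
    let cnt := tags.countP (fun t => rest.contains t)   -- sum(1 for t in tags if t in rest)
    if cnt != 0 then bs.set cnt (bs.getD cnt [] ++ [doc]) else bs)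
    (List.replicate (tags.length + 1) ([] : List String))
  altCollect buckets tags.length []

-- ===== PRECONDITION & SPEC =====
-- Pre_ excludes dataSource rows that are empty lists: Python A's 'for Doc,*Tag in dataSource'
-- raises ValueError there (and B's row[0] raises IndexError).
def Pre_solution (dataSource : List (List String)) (tags : List String) : Prop :=
  ∀ row ∈ dataSource, row ≠ []
instance (dataSource : List (List String)) (tags : List String) : Decidable (Pre_solution dataSource tags) := by unfold Pre_solution; infer_instance
def pvWitness_solution : List (List String) × List String :=
  ([["doc1", "x"], ["doc2", "x", "y"], ["doc3", "z"]], ["x", "y"])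

def Spec_solution (dataSource : List (List String)) (tags : List String) (out : List String) : Prop := out = solution_alt dataSource tags
instance (dataSource : List (List String)) (tags : List String) (out : List String) : Decidable (Spec_solution dataSource tags out) := by unfold Spec_solution; infer_instance

-- ===== CLAIM (what is proved, stated in full; the proofs are below) =====
def Claim_equal_solution : Prop := ∀ (dataSource : List (List String)) (tags : List String), Dom_solution dataSource tags → Pre_solution dataSource tags → Spec_solution dataSource tags (solution dataSource tags)

-- ===== LEMMAS AND PROOFS =====

-- match count of a row, and the (name, count) list A builds
def cntN (tags : List String) (row : List String) : Nat :=
  tags.countP (fun t => row.tail.contains t)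

def pairsOf (tags : List String) (ds : List (List String)) : List (String × Int) :=
  (ds.filter (fun r => cntN tags r != 0)).map (fun r => (r.headD "", (cntN tags r : Int)))

-- the descending count list K, K-1, …, 1
def cnts : Nat → List Int
  | 0 => []
  | k + 1 => ((k : Int) + 1) :: cnts k

def bucketCat (k : Nat) (l : List (String × Int)) : List (String × Int) :=
  (cnts k).flatMap (fun c => l.filter (fun p => p.2 == c))

lemma mem_cnts {c : Int} {k : Nat} : c ∈ cnts k ↔ 1 ≤ c ∧ c ≤ (k : Int) := by
  induction k with
  | zero => simp [cnts]; omega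
  | succ k ih =>
    simp [cnts, ih]
    constructor
    · rintro (rfl | ⟨h1, h2⟩) <;> push_cast <;> omega
    · rintro ⟨h1, h2⟩
      push_cast at h2
      by_cases h : c = (k : Int) + 1
      · left; omega
      · right; omega

lemma cnts_split {c K : Nat} (h : c ≤ K) :
    ∃ pre, cnts K = pre ++ cnts c ∧ ∀ d ∈ pre, (c : Int) < d := by
  induction K with
  | zero => exact ⟨[], by simpa using (Nat.le_zero.mp h) ▸ rfl, by simp⟩
  | succ K ih =>
    rcases Nat.lt_or_ge c (K + 1) with hlt | hge
    · obtain ⟨pre, hpre, hd⟩ := ih (by omega)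
      refine ⟨((K : Int) + 1) :: pre, by simp [cnts, hpre], ?_⟩
      intro d hd'
      rcases List.mem_cons.mp hd' with rfl | hd''
      · push_cast; omega
      · exact hd d hd''
    · have : c = K + 1 := by omega
      subst this
      exact ⟨[], by simp, by simp⟩

lemma flatMap_congr_mem {α β : Type} {l : List α} {f g : α → List β}
    (h : ∀ x ∈ l, f x = g x) : l.flatMap f = l.flatMap g := by
  induction l with
  | nil => rfl
  | cons x xs ih =>
    simp only [List.flatMap_cons, h x (by simp), ih (fun y hy => h y (by simp [hy]))]

lemma insertBy_append_of_not {α : Type} (p : α → α → Bool) (x : α) (A B : List α)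
    (hA : ∀ y ∈ A, p x y = false) :
    PySem.List.insertBy p x (A ++ B) = A ++ PySem.List.insertBy p x B := by
  induction A with
  | nil => rfl
  | cons a A ih =>
    have := hA a (by simp)
    simp [PySem.List.insertBy, this, ih (fun y hy => hA y (by simp [hy]))]

lemma insertBy_all_before {α : Type} (p : α → α → Bool) (x : α) (B : List α)
    (hB : ∀ y ∈ B, p x y = true) :
    PySem.List.insertBy p x B = x :: B := by
  cases B with
  | nil => rfl
  | cons b B => simp [PySem.List.insertBy, hB b (by simp)]

lemma filter_append_single {l : List (String × Int)} {x : String × Int} {c : Int} :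
    (l ++ [x]).filter (fun p => p.2 == c) =
      l.filter (fun p => p.2 == c) ++ (if x.2 == c then [x] else []) := by
  rw [List.filter_append]
  congr 1
  cases hbe : x.2 == c <;> simp [List.filter, hbe]

lemma sorted_bucket (K : Nat) (l : List (String × Int))
    (h : ∀ p ∈ l, 1 ≤ p.2 ∧ p.2 ≤ (K : Int)) :
    PySem.List.sorted l (fun p => p.2) true = bucketCat K l := by
  induction l using List.reverseRecOn with
  | nil =>
    rw [PySem.List.sorted_rev_eq_foldl_insertBy]
    simp [bucketCat, List.flatMap]
  | append_singleton l x ih =>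
    have hx := h x (by simp)
    have hl : ∀ p ∈ l, 1 ≤ p.2 ∧ p.2 ≤ (K : Int) := fun p hp => h p (by simp [hp])
    rw [PySem.List.sorted_rev_eq_foldl_insertBy, List.foldl_append, List.foldl_cons,
      List.foldl_nil, ← PySem.List.sorted_rev_eq_foldl_insertBy, ih hl]
    -- x.2 = ↑m + 1 for a natural m
    obtain ⟨m, hm⟩ : ∃ m : Nat, x.2 = (m : Int) + 1 :=
      ⟨x.2.toNat - 1, by omega⟩
    have hmK : m + 1 ≤ K := by omega
    obtain ⟨pre, hsplit, hpre⟩ := cnts_split hmK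
    -- abbreviations
    have hbl : bucketCat K l
        = (pre.flatMap (fun c => l.filter (fun p => p.2 == c))
            ++ l.filter (fun p => p.2 == (m : Int) + 1))
          ++ (cnts m).flatMap (fun c => l.filter (fun p => p.2 == c)) := by
      rw [bucketCat, hsplit, List.flatMap_append]
      simp [cnts, List.append_assoc]
    rw [hbl]
    rw [insertBy_append_of_not _ x _ _ ?_, insertBy_all_before _ x _ ?_]
    · -- assembled insertion = bucketCat of l ++ [x]
      rw [bucketCat, hsplit, List.flatMap_append]
      have hpre' : pre.flatMap (fun c => (l ++ [x]).filter (fun p => p.2 == c))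
          = pre.flatMap (fun c => l.filter (fun p => p.2 == c)) := by
        refine flatMap_congr_mem (fun c hc => ?_)
        rw [filter_append_single]
        have : (x.2 == c) = false := by
          have := hpre c hc
          simp [hm]; omega
        simp [this]
      have hmid : (cnts (m + 1)).flatMap (fun c => (l ++ [x]).filter (fun p => p.2 == c))
          = (l.filter (fun p => p.2 == (m : Int) + 1) ++ [x])
            ++ (cnts m).flatMap (fun c => l.filter (fun p => p.2 == c)) := by
        rw [show cnts (m + 1) = ((m : Int) + 1) :: cnts m from rfl, List.flatMap_cons]
        congr 1
        · rw [filter_append_single]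
          have : (x.2 == (m : Int) + 1) = true := by simp [hm]
          simp [this]
        · refine flatMap_congr_mem (fun c hc => ?_)
          rw [filter_append_single]
          have hcm := mem_cnts.mp hc
          have : (x.2 == c) = false := by simp [hm]; omega
          simp [this]
      rw [hpre', hmid]
      simp [List.append_assoc]
    · -- everything in the suffix has key < x.2
      intro y hy
      obtain ⟨c, hc, hyf⟩ := List.mem_flatMap.mp hy
      have h1 := mem_cnts.mp hc
      have h2 : (y.2 == c) = true := (List.mem_filter.mp hyf).2
      simp at h2 ⊢
      omega
    · -- everything in the prefix has key ≥ x.2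
      intro y hy
      rcases List.mem_append.mp hy with hy | hy
      · obtain ⟨c, hc, hyf⟩ := List.mem_flatMap.mp hy
        have h1 := hpre c hc
        have h2 : (y.2 == c) = true := (List.mem_filter.mp hyf).2
        simp at h2 ⊢
        omega
      · have h2 : (y.2 == (m : Int) + 1) = true := (List.mem_filter.mp hy).2
        simp at h2 ⊢
        omega

lemma take10_append (xs ys : List String) :
    (xs.take 10 ++ ys).take 10 = (xs ++ ys).take 10 := by
  rcases Nat.le_total xs.length 10 with h | h
  · rw [List.take_of_length_le h]
  · rw [List.take_append, List.take_append]
    simp [List.take_take]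
    omega

lemma altTake10_eq (b res : List String) (h : res.length ≤ 10) :
    altTake10 b res = (res ++ b).take 10 := by
  induction b generalizing res with
  | nil => simp [altTake10, List.take_of_length_le h]
  | cons d bs ih =>
    by_cases h10 : res.length = 10
    · simp only [altTake10, h10, beq_self_eq_true, if_pos rfl, List.take_append, h10]
      simp [List.take_of_length_le (le_of_eq h10), h10]
    · have hlt : res.length < 10 := by omega
      simp only [altTake10, beq_iff_eq, h10, if_false]
      rw [ih (res ++ [d]) (by simp; omega)]
      simp

lemma altCollect_eq (b : List (List String)) (k : Nat) (res : List String)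
    (h : res.length ≤ 10) :
    altCollect b k res = (res ++ (cnts k).flatMap (fun c => b.getD c.toNat [])).take 10 := by
  induction k generalizing res with
  | zero => simp [altCollect, cnts, List.take_of_length_le h]
  | succ k ih =>
    simp only [altCollect, cnts, List.flatMap_cons]
    rw [altTake10_eq _ _ h, ih _ (by simp [List.length_take])]
    have : ((k : Int) + 1).toNat = k + 1 := by omega
    rw [this, take10_append, List.append_assoc]

lemma solTakeLoop_eq (l : List (String × Int)) (r : Nat) (h : r ≤ 10) :
    solTakeLoop l (r : Int) = (l.take (10 - r)).map Prod.fst := by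
  induction l generalizing r with
  | nil => simp [solTakeLoop]
  | cons x xs ih =>
    obtain ⟨d, c⟩ := x
    by_cases h10 : r = 10
    · simp [solTakeLoop, h10]
    · have : ((r : Int) == 10) = false := by simp; omega
      have hs : (r : Int) + 1 = ((r + 1 : Nat) : Int) := by push_cast; ring
      simp only [solTakeLoop, this, hs, ih (r + 1) (by omega)]
      have h2 : 10 - r = (10 - (r + 1)) + 1 := by omega
      rw [h2, List.take_succ_cons, List.map_cons]
      simp

-- A's first loop builds pairsOf
lemma answer_eq (ds : List (List String)) (tags : List String) :
    ds.foldl (fun acc row =>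
      let Doc := row.headD ""
      let Tag := row.tail
      let cnt : Int := tags.foldl (fun c t => if Tag.contains t then c + 1 else c) 0
      if cnt != 0 then acc ++ [(Doc, cnt)] else acc) [] = pairsOf tags ds := by
  have hstep : (fun (acc : List (String × Int)) (row : List String) =>
      let Doc := row.headD ""
      let Tag := row.tail
      let cnt : Int := tags.foldl (fun c t => if Tag.contains t then c + 1 else c) 0
      if cnt != 0 then acc ++ [(Doc, cnt)] else acc)
      = (fun acc row => if (fun r => cntN tags r != 0) row = true
          then acc ++ [(fun r => (r.headD "", (cntN tags r : Int))) row] else acc) := by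
    funext acc row
    simp only [PySem.List.foldl_if_add_one, zero_add, cntN, bne_iff_ne, ne_eq,
      Nat.cast_eq_zero]
  rw [hstep, PySem.List.foldl_append_if]
  rfl


-- the bucket fold, with a generalised accumulator
lemma buckets_aux (tags : List String) (ds : List (List String)) :
    ∀ (bs : List (List String)), bs.length = tags.length + 1 → ∀ k : Nat,
      (ds.foldl (fun bs row =>
        let doc := row.headD ""
        let rest := row.tail
        let cnt := tags.countP (fun t => rest.contains t)
        if cnt != 0 then bs.set cnt (bs.getD cnt [] ++ [doc]) else bs) bs).getD k []
      = bs.getD k [] ++ ((pairsOf tags ds).filter (fun p => p.2 == (k : Int))).map Prod.fst := by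
  induction ds with
  | nil => intro bs hlen k; simp [pairsOf]
  | cons row ds ih =>
    intro bs hlen k
    rw [List.foldl_cons]
    have hcn : cntN tags row = tags.countP (fun t => row.tail.contains t) := rfl
    by_cases hc : cntN tags row = 0
    · have h0 : (tags.countP (fun t => row.tail.contains t) != 0) = false := by
        rw [← hcn, hc]; rfl
      have hpairs : pairsOf tags (row :: ds) = pairsOf tags ds := by
        simp only [pairsOf, List.filter_cons, hc]
        simp
      simp only [h0, Bool.false_eq_true, if_false]
      rw [ih bs hlen k, hpairs]
    · have h1 : (tags.countP (fun t => row.tail.contains t) != 0) = true := by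
        rw [← hcn]; simpa using hc
      have hcnt_lt : cntN tags row < bs.length := by
        have := List.countP_le_length (p := fun t => row.tail.contains t) (l := tags)
        rw [hcn]; omega
      have hpairs : pairsOf tags (row :: ds)
          = (row.headD "", (cntN tags row : Int)) :: pairsOf tags ds := by
        simp only [pairsOf, List.filter_cons]
        have : (cntN tags row != 0) = true := by simpa using hc
        simp [this]
      simp only [h1, if_true]
      simp only [← hcn]
      rw [ih _ (by simp [hlen]) k, hpairs]
      by_cases hk : k = cntN tags row
      · subst hk
        have hset : ((bs.set (cntN tags row)
            (bs.getD (cntN tags row) [] ++ [row.headD ""])).getD (cntN tags row) [])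
            = bs.getD (cntN tags row) [] ++ [row.headD ""] := by
          simp [List.getD, hcnt_lt]
        rw [hset]
        simp [List.filter_cons]
      · have hset : ((bs.set (cntN tags row)
            (bs.getD (cntN tags row) [] ++ [row.headD ""])).getD k [])
            = bs.getD k [] := by
          simp [List.getD, List.getElem?_set, Ne.symm hk]
        rw [hset]
        have hne : (((cntN tags row : Int)) == (k : Int)) = false := by
          simp; omega
        simp [List.filter_cons, hne]

-- B's buckets characterised
lemma buckets_eq (tags : List String) (ds : List (List String)) :
    ∀ k : Nat,
      (ds.foldl (fun bs row =>
        let doc := row.headD ""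
        let rest := row.tail
        let cnt := tags.countP (fun t => rest.contains t)
        if cnt != 0 then bs.set cnt (bs.getD cnt [] ++ [doc]) else bs)
        (List.replicate (tags.length + 1) ([] : List String))).getD k []
      = ((pairsOf tags ds).filter (fun p => p.2 == (k : Int))).map Prod.fst := by
  intro k
  rw [buckets_aux tags ds (List.replicate (tags.length + 1) []) (by simp) k]
  simp [List.getD]

-- ===== VERDICT (by name: the statement is the Claim_ definition above) =====
theorem solution_spec : Claim_equal_solution := by
  intro ds tags _ _
  unfold Spec_solution
  have hbnd : ∀ p ∈ pairsOf tags ds, 1 ≤ p.2 ∧ p.2 ≤ (tags.length : Int) := by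
    intro p hp
    obtain ⟨r, hr, rfl⟩ := List.mem_map.mp hp
    have h1 : (cntN tags r != 0) = true := (List.mem_filter.mp hr).2
    have h2 : cntN tags r ≤ tags.length := List.countP_le_length
    simp at h1 ⊢
    omega
  have hA : solution ds tags
      = ((bucketCat tags.length (pairsOf tags ds)).take 10).map Prod.fst := by
    unfold solution
    rw [answer_eq]
    show solTakeLoop (PySem.List.sorted (pairsOf tags ds) (fun x => x.2) true) 0 = _
    rw [sorted_bucket tags.length _ hbnd]
    have h0 := solTakeLoop_eq (bucketCat tags.length (pairsOf tags ds)) 0 (by omega)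
    simpa using h0
  have hB : solution_alt ds tags
      = ((bucketCat tags.length (pairsOf tags ds)).map Prod.fst).take 10 := by
    unfold solution_alt
    show altCollect (ds.foldl (fun bs row =>
          let doc := row.headD ""
          let rest := row.tail
          let cnt := tags.countP (fun t => rest.contains t)
          if cnt != 0 then bs.set cnt (bs.getD cnt [] ++ [doc]) else bs)
          (List.replicate (tags.length + 1) ([] : List String))) tags.length [] = _
    rw [altCollect_eq _ _ _ (by simp), List.nil_append]
    have hg : ∀ c ∈ cnts tags.length,
        (ds.foldl (fun bs row =>
          let doc := row.headD ""
          let rest := row.tail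
          let cnt := tags.countP (fun t => rest.contains t)
          if cnt != 0 then bs.set cnt (bs.getD cnt [] ++ [doc]) else bs)
          (List.replicate (tags.length + 1) ([] : List String))).getD c.toNat []
        = ((pairsOf tags ds).filter (fun p => p.2 == c)).map Prod.fst := by
      intro c hc
      have h1 := mem_cnts.mp hc
      have h2 : ((c.toNat : Nat) : Int) = c := by omega
      rw [buckets_eq tags ds c.toNat, h2]
    rw [flatMap_congr_mem hg, bucketCat, List.map_flatMap]
  rw [hA, hB, List.map_take]
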